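-- pv_equiv track=rewrite | github.com/AnuragSharma1803/address-standardization-tool | deduplication.py | select_best_line
-- ===== SOURCE A (Python) =====
-- from collections import Counter
--
-- def contains_digit(text):
--     return any(char.isdigit() for char in text)
--
-- def starts_with_digit_in_first_n_words(text, n=3):
--     tokens = text.lower().split()
--     return any(any(c.isdigit() for c in token) for token in tokens[:n])
--
-- def select_best_line(group):
--     candidate_group = [line for line in group if not starts_with_digit_in_first_n_words(line)]
--     if not candidate_group:
--         candidate_group = group
--
--     counts = Counter(candidate_group)
--     most_common_line, freq = counts.most_common(1)[0]
--     if freq > 1: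
--         return most_common_line
--
--     if len(candidate_group) == 2:
--         digit_lines = [line for line in candidate_group if contains_digit(line)]
--         if len(digit_lines) == 2:
--             return min(digit_lines, key=len)
--         elif len(digit_lines) == 1:
--             return digit_lines[0]
--         else:
--             return min(candidate_group, key=len)
--
--     digit_lines = [line for line in candidate_group if contains_digit(line)]
--     return min(digit_lines, key=len) if digit_lines else min(candidate_group, key=len)
-- ===== SOURCE B (Python) =====
-- from collections import Counter
--
-- def contains_digit(text):
--     return any(char.isdigit() for char in text)
--
-- def starts_with_digit_in_first_n_words(text, n=3):
--     tokens = text.lower().split()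
--     return any(any(c.isdigit() for c in token) for token in tokens[:n])
--
-- def select_best_line(group):
--     candidate_group = [line for line in group if not starts_with_digit_in_first_n_words(line)] or group
--     counts = Counter(candidate_group)
--     best = max(counts, key=counts.get)
--     if counts[best] > 1:
--         return best
--     return min(candidate_group, key=lambda l: (not contains_digit(l), len(l)))
-- ===== Notes on version B (the rewrite author's own statement) =====
-- stated objective: simpler
-- what changed: The early duplicate return is done by max over the counter's keys instead of most_common(1), and the whole remaining branch structure (including the redundant len==2 special case) is collapsed into one min with the composite key (not contains_digit(l), len(l)).
import Mathlib
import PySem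

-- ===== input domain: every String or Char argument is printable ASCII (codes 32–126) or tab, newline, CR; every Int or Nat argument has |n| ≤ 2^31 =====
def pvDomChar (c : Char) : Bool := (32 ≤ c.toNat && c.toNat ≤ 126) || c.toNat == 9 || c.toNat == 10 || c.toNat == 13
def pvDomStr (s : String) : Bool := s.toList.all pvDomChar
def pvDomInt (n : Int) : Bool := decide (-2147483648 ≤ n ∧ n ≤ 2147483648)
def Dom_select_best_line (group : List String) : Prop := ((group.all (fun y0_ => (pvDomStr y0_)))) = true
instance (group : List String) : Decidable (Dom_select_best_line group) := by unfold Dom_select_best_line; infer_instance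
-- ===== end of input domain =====

-- B replaces most_common(1) by max over the counter's keys and collapses A's whole
-- post-Counter branch structure (including the redundant len==2 case) into one composite-key min (objective: simpler).

-- ===== PORT A =====
-- helpers shared verbatim by both Python files
def contains_digit (text : String) : Bool :=
  text.toList.any PySem.Chars.isdigit

def starts_with_digit_in_first_n_words (text : String) (n : Int) : Bool :=
  let tokens := PySem.Str.split₀ (PySem.Str.lower text)
  (PySem.List.slice tokens none (some n)).any (fun token => token.toList.any PySem.Chars.isdigit)

def select_best_line (group : List String) : String :=
  let candidate_group0 := group.filter (fun line => !starts_with_digit_in_first_n_words line 3)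
  let candidate_group := if candidate_group0.isEmpty then group else candidate_group0
  let counts := PySem.Dict.counter candidate_group
  match PySem.List.max? counts.items (fun p => p.2) with
  | none => ""   -- counts.most_common(1)[0] raises IndexError on empty input; excluded by Pre_
  | some (most_common_line, freq) =>
    if freq > 1 then most_common_line
    else if candidate_group.length = 2 then
      let digit_lines := candidate_group.filter contains_digit
      if digit_lines.length = 2 then (PySem.List.min? digit_lines PySem.Str.len).getD ""
      else if digit_lines.length = 1 then PySem.List.pyGetD digit_lines 0 ""
      else (PySem.List.min? candidate_group PySem.Str.len).getD ""
    else
      let digit_lines := candidate_group.filter contains_digit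
      if !digit_lines.isEmpty then (PySem.List.min? digit_lines PySem.Str.len).getD ""
      else (PySem.List.min? candidate_group PySem.Str.len).getD ""

-- ===== PORT B =====
def select_best_line_alt (group : List String) : String :=
  let candidate_group :=
    match group.filter (fun line => !starts_with_digit_in_first_n_words line 3) with
    | [] => group
    | c => c
  let counts := PySem.Dict.counter candidate_group
  match PySem.List.max? counts.keys (fun k => counts.getD k 0) with
  | none => ""   -- max(counts, key=counts.get) raises ValueError on empty input; excluded by Pre_
  | some best =>
    if counts.getD best 0 > 1 then best
    else (PySem.List.min2? candidate_group (fun l => !contains_digit l) PySem.Str.len).getD ""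

-- ===== PRECONDITION & SPEC =====
-- Pre_ excludes only the empty list, on which both Pythons raise (A: IndexError, B: ValueError).
def Pre_select_best_line (group : List String) : Prop := group ≠ []
instance (group : List String) : Decidable (Pre_select_best_line group) := by unfold Pre_select_best_line; infer_instance
def pvWitness_select_best_line : List String := ["1 Main St", "Main Street"]

def Spec_select_best_line (group : List String) (out : String) : Prop := out = select_best_line_alt group
instance (group : List String) (out : String) : Decidable (Spec_select_best_line group out) := by unfold Spec_select_best_line; infer_instance

-- ===== CLAIM (what is proved, stated in full; the proofs are below) =====
def Claim_equal_select_best_line : Prop := ∀ (group : List String), Dom_select_best_line group → Pre_select_best_line group → Spec_select_best_line group (select_best_line group)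

-- ===== LEMMAS AND PROOFS =====

-- max? over a mapped list (used to relate A's max over items to B's max over keys)
theorem pv_max?_foldl_map {α β κ : Type} [LT κ] [DecidableLT κ] (xs : List α) (g : α → β) (key : β → κ)
    (acc : Option α) :
    List.foldl
      (fun acc x => match acc with
        | none => some x
        | some m => if key m < key x then some x else some m)
      (acc.map g) (xs.map g)
    = (List.foldl
      (fun acc x => match acc with
        | none => some x
        | some m => if key (g m) < key (g x) then some x else some m)
      acc xs).map g := by
  induction xs generalizing acc with
  | nil => rfl
  | cons x xs ih =>
    cases acc with
    | none => simpa using ih (some x)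
    | some m =>
      simp only [List.map_cons, List.foldl_cons, Option.map_some]
      by_cases h : key (g m) < key (g x) <;> simp [h, ← ih]

theorem pv_max?_map {α β κ : Type} [LT κ] [DecidableLT κ] (xs : List α) (g : α → β) (key : β → κ) :
    PySem.List.max? (xs.map g) key = (PySem.List.max? xs (fun x => key (g x))).map g := by
  simpa using pv_max?_foldl_map xs g key none

-- the two loop bodies: pvStep1 is min?'s step, pvStep2 is min2?'s step for the key (!p ·, k2 ·)
def pvStep1 {α : Type} (k2 : α → Int) (acc : Option α) (x : α) : Option α :=
  match acc with
  | none => some x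
  | some mm => if k2 x < k2 mm then some x else some mm

def pvStep2 {α : Type} (p : α → Bool) (k2 : α → Int) (acc : Option α) (x : α) : Option α :=
  match acc with
  | none => some x
  | some mm => if (decide ((!p x) < (!p mm)) || !decide ((!p mm) < (!p x)) && decide (k2 x < k2 mm)) = true
               then some x else some mm

theorem pvStep2_eq_step1 {α : Type} (p : α → Bool) (k2 : α → Int) (mm x : α) (h : p x = p mm) :
    pvStep2 p k2 (some mm) x = pvStep1 k2 (some mm) x := by
  cases hx : p x <;> cases hm : p mm <;> simp_all [pvStep2, pvStep1]

theorem pvStep2_skip {α : Type} (p : α → Bool) (k2 : α → Int) (mm x : α)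
    (hm : p mm = true) (hx : p x = false) :
    pvStep2 p k2 (some mm) x = some mm := by
  simp [pvStep2, hm, hx, show ((true : Bool) < false) = False by decide,
    show ((false : Bool) < true) = True by decide]

theorem pvStep2_take {α : Type} (p : α → Bool) (k2 : α → Int) (mm x : α)
    (hm : p mm = false) (hx : p x = true) :
    pvStep2 p k2 (some mm) x = some x := by
  simp [pvStep2, hm, hx, show ((false : Bool) < true) = True by decide]

-- once a p-element is the running best, non-p elements are ignored: the min2? loop
-- continues as A's plain min?-by-len loop over the p-filtered rest
theorem pv_min2_aux_digit {α : Type} (p : α → Bool) (k2 : α → Int) (xs : List α) (m : α) (hm : p m = true) :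
    List.foldl (pvStep2 p k2) (some m) xs = List.foldl (pvStep1 k2) (some m) (xs.filter p) := by
  induction xs generalizing m with
  | nil => rfl
  | cons x xs ih =>
    by_cases hx : p x
    · rw [List.filter_cons, if_pos hx, List.foldl_cons, List.foldl_cons,
        pvStep2_eq_step1 p k2 m x (hx.trans hm.symm)]
      by_cases hlt : k2 x < k2 m
      · rw [show pvStep1 k2 (some m) x = some x by simp [pvStep1, hlt]]; exact ih x hx
      · rw [show pvStep1 k2 (some m) x = some m by simp [pvStep1, hlt]]; exact ih m hm
    · have hx' : p x = false := by simpa using hx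
      rw [List.filter_cons, List.foldl_cons, pvStep2_skip p k2 m x hm hx']
      simp only [hx', Bool.false_eq_true, if_false]
      exact ih m hm

theorem pv_min2_aux_main {α : Type} (p : α → Bool) (k2 : α → Int) (xs : List α) (acc : Option α)
    (hacc : ∀ m, acc = some m → p m = false) :
    List.foldl (pvStep2 p k2) acc xs
    = if (xs.filter p).isEmpty
      then List.foldl (pvStep1 k2) acc xs
      else List.foldl (pvStep1 k2) none (xs.filter p) := by
  induction xs generalizing acc with
  | nil => simp
  | cons x xs ih =>
    by_cases hx : p x
    · have hstep : pvStep2 p k2 acc x = some x := by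
        cases hacc' : acc with
        | none => rfl
        | some m => exact pvStep2_take p k2 m x (hacc m hacc') hx
      rw [List.filter_cons, if_pos hx, List.foldl_cons, hstep]
      simp only [List.isEmpty_cons, if_false, Bool.false_eq_true]
      rw [pv_min2_aux_digit p k2 xs x hx, List.foldl_cons]
      rfl
    · have hx' : p x = false := by simpa using hx
      have hstep : pvStep2 p k2 acc x = pvStep1 k2 acc x := by
        cases hacc' : acc with
        | none => rfl
        | some m => exact pvStep2_eq_step1 p k2 m x (hx'.trans (hacc m hacc').symm)
      have hinv : ∀ m, pvStep1 k2 acc x = some m → p m = false := by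
        intro m hmm
        cases hacc' : acc with
        | none => simp [pvStep1, hacc'] at hmm; exact hmm ▸ hx'
        | some mm =>
          rw [hacc'] at hmm
          simp only [pvStep1] at hmm
          by_cases hlt : k2 x < k2 mm
          · rw [if_pos hlt] at hmm; exact Option.some.inj hmm ▸ hx'
          · rw [if_neg hlt] at hmm; exact Option.some.inj hmm ▸ hacc mm hacc'
      rw [List.filter_cons, List.foldl_cons, hstep, ih _ hinv]
      simp [hx']

-- the composite-key min is: min-by-len over the p-elements if any, else min-by-len over all
theorem pv_min2_not_filter {α : Type} (p : α → Bool) (k2 : α → Int) (xs : List α) :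
    PySem.List.min2? xs (fun x => !p x) k2
    = if (xs.filter p).isEmpty then PySem.List.min? xs k2 else PySem.List.min? (xs.filter p) k2 := by
  have h1 : PySem.List.min2? xs (fun x => !p x) k2 = List.foldl (pvStep2 p k2) none xs := rfl
  have h2 : ∀ (ys : List α), PySem.List.min? ys k2 = List.foldl (pvStep1 k2) none ys := fun _ => rfl
  rw [h1, h2, h2, pv_min2_aux_main p k2 xs none (by simp)]

-- A's whole post-Counter branch structure equals B's single composite-key min
theorem pv_tail_eq (cand : List String) :
    (if cand.length = 2 then
      let digit_lines := cand.filter contains_digit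
      if digit_lines.length = 2 then (PySem.List.min? digit_lines PySem.Str.len).getD ""
      else if digit_lines.length = 1 then PySem.List.pyGetD digit_lines 0 ""
      else (PySem.List.min? cand PySem.Str.len).getD ""
    else
      let digit_lines := cand.filter contains_digit
      if !digit_lines.isEmpty then (PySem.List.min? digit_lines PySem.Str.len).getD ""
      else (PySem.List.min? cand PySem.Str.len).getD "")
    = (PySem.List.min2? cand (fun l => !contains_digit l) PySem.Str.len).getD "" := by
  rw [pv_min2_not_filter contains_digit PySem.Str.len cand]
  by_cases h2 : cand.length = 2
  · simp only [h2, if_pos]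
    rcases hdl : cand.filter contains_digit with _ | ⟨x, _ | ⟨y, rest⟩⟩
    · simp
    · -- one digit line: digit_lines[0] = min over [x]
      simp [PySem.List.min?]
    · -- at least two digit lines: the filter of a 2-element list has exactly 2, so rest = []
      have hle := List.length_filter_le contains_digit cand
      rw [hdl] at hle; rw [h2] at hle
      have : rest = [] := by
        cases rest with
        | nil => rfl
        | cons a b => simp at hle
      subst this
      simp
  · simp only [h2, if_false]
    by_cases he : (cand.filter contains_digit).isEmpty
    · simp [he]
    · simp [he]

-- the two ports agree on any nonempty candidate list
theorem pv_core (cand : List String) (hc : cand ≠ []) :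
    (match PySem.List.max? (PySem.Dict.counter cand).items (fun p => p.2) with
    | none => ""
    | some (most_common_line, freq) =>
      if freq > 1 then most_common_line
      else if cand.length = 2 then
        let digit_lines := cand.filter contains_digit
        if digit_lines.length = 2 then (PySem.List.min? digit_lines PySem.Str.len).getD ""
        else if digit_lines.length = 1 then PySem.List.pyGetD digit_lines 0 ""
        else (PySem.List.min? cand PySem.Str.len).getD ""
      else
        let digit_lines := cand.filter contains_digit
        if !digit_lines.isEmpty then (PySem.List.min? digit_lines PySem.Str.len).getD ""
        else (PySem.List.min? cand PySem.Str.len).getD "")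
    = (match PySem.List.max? (PySem.Dict.counter cand).keys (fun k => (PySem.Dict.counter cand).getD k 0) with
    | none => ""
    | some best =>
      if (PySem.Dict.counter cand).getD best 0 > 1 then best
      else (PySem.List.min2? cand (fun l => !contains_digit l) PySem.Str.len).getD "") := by
  have hitems : (PySem.Dict.counter cand).items
      = ((PySem.Dict.counter cand).keys).map (fun k => (k, (PySem.Dict.counter cand).getD k 0)) :=
    PySem.Dict.items_eq_map_keys _ (PySem.Dict.nodup_keys_counter cand) 0
  have hmm := pv_max?_map (PySem.Dict.counter cand).keys
    (fun k => (k, (PySem.Dict.counter cand).getD k 0)) (fun p : String × Int => p.2)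
  beta_reduce at hmm
  rw [hitems, hmm]
  cases hmax : PySem.List.max? (PySem.Dict.counter cand).keys
      (fun k => (PySem.Dict.counter cand).getD k 0) with
  | none =>
    exfalso
    rw [PySem.List.max?_eq_none_iff] at hmax
    rcases List.exists_mem_of_ne_nil cand hc with ⟨x, hx⟩
    have : x ∈ (PySem.Dict.counter cand).keys := by
      rw [PySem.Dict.keys_counter]
      exact (PySem.Set.mem_ofList cand x).mpr hx
    rw [hmax] at this
    exact absurd this (List.not_mem_nil)
  | some best =>
    simp only [Option.map_some]
    by_cases hfreq : (PySem.Dict.counter cand).getD best 0 > 1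
    · simp only [if_pos hfreq]
    · simp only [if_neg hfreq]
      exact pv_tail_eq cand

-- ===== VERDICT (by name: the statement is the Claim_ definition above) =====
theorem select_best_line_spec : Claim_equal_select_best_line := by
  intro group _ hpre
  unfold Spec_select_best_line
  simp only [select_best_line, select_best_line_alt]
  cases hfe : List.filter (fun line => !starts_with_digit_in_first_n_words line 3) group with
  | nil => exact pv_core group hpre
  | cons a l => exact pv_core (a :: l) (by simp)
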